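-- pv_equiv track=rewrite | github.com/JFrunk/bridge-bidding-app | backend/play_bridge.py | determine_contract
-- ===== SOURCE A (Python) =====
-- from typing import Dict, List, Optional, Tuple
--
-- def determine_contract(auction: List[Dict]) -> Tuple[Optional[str], Optional[str], Optional[str]]:
--     """Determine the final contract from the auction."""
--     # Find the last non-pass bid
--     last_real_bid = None
--     declarer = None
--     doubled = ""
--
--     bids_only = [a['bid'] for a in auction]
--
--     for i in range(len(auction) - 1, -1, -1):
--         bid = auction[i]['bid']
--         if bid not in ['Pass', 'X', 'XX']:
--             last_real_bid = bid
--             break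
--         elif bid == 'XX':
--             doubled = "XX"
--         elif bid == 'X' and doubled != "XX":
--             doubled = "X"
--
--     if last_real_bid is None:
--         return None, None, None  # All pass
--
--     # Find declarer: first player of winning side to bid the strain
--     strain = last_real_bid[-1] if 'NT' not in last_real_bid else 'NT'
--     if 'NT' in last_real_bid:
--         strain = 'NT'
--
--     # Find the side that won (the partnership that made the last real bid)
--     for i in range(len(auction) - 1, -1, -1):
--         if auction[i]['bid'] == last_real_bid:
--             winning_player = auction[i]['player']
--             break
--
--     ns_players = ['North', 'South']
--     ew_players = ['East', 'West']
--
--     winning_side = ns_players if winning_player in ns_players else ew_players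
--
--     # Find first player of winning side to bid this strain
--     for a in auction:
--         if a['player'] in winning_side:
--             bid = a['bid']
--             if bid not in ['Pass', 'X', 'XX']:
--                 bid_strain = bid[-1] if 'NT' not in bid else 'NT'
--                 if 'NT' in bid:
--                     bid_strain = 'NT'
--                 if bid_strain == strain:
--                     declarer = a['player']
--                     break
--
--     contract = last_real_bid + doubled
--
--     return contract, declarer, doubled
-- ===== SOURCE B (Python) =====
-- from typing import Dict, List, Optional, Tuple
--
-- NS = ('North', 'South')
-- EW = ('East', 'West')
--
-- def determine_contract(auction: List[Dict]) -> Tuple[Optional[str], Optional[str], Optional[str]]: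
--     """Single forward pass: track the last real bid and its player, the
--     doubling state, and the first index at which each (player, strain) bid."""
--     last = None            # (bid, player) of the latest real bid
--     doubled = ""
--     first = {}             # (player, strain) -> index of first such real bid
--     for i, a in enumerate(auction):
--         bid, player = a['bid'], a['player']
--         if bid not in ('Pass', 'X', 'XX'):
--             last, doubled = (bid, player), ""
--             first.setdefault((player, 'NT' if 'NT' in bid else bid[-1]), i)
--         elif bid == 'XX':
--             doubled = 'XX'
--         elif bid == 'X' and doubled != 'XX':
--             doubled = 'X'
--     if last is None:
--         return None, None, None
--     bid, player = last
--     strain = 'NT' if 'NT' in bid else bid[-1]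
--     pair = NS if player in NS else EW
--     i1, i2 = first.get((pair[0], strain)), first.get((pair[1], strain))
--     if i1 is None:
--         declarer = None if i2 is None else pair[1]
--     elif i2 is None or i1 < i2:
--         declarer = pair[0]
--     else:
--         declarer = pair[1]
--     return bid + doubled, declarer, doubled
-- ===== Notes on version B (the rewrite author's own statement) =====
-- stated objective: alternative
-- what changed: A's two backward scans (last real bid + doubling tail, then winning player) and forward declarer scan are replaced by a single forward pass that maintains the last real bid and its player, the doubling state (reset on each real bid), and a dict mapping (player, strain) to the first index it was bid, from which the declarer is read off at the end.
import Mathlib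
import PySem

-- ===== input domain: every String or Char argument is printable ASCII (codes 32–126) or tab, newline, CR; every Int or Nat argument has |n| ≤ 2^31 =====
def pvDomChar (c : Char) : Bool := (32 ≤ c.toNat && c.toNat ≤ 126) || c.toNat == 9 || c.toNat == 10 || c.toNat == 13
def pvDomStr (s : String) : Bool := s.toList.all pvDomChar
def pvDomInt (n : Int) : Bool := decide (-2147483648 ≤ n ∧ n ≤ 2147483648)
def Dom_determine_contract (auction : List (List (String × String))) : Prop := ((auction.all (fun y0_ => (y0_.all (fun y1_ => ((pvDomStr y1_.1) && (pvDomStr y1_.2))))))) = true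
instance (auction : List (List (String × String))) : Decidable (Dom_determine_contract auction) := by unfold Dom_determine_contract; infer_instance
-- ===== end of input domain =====

-- B replaces A's three scans (two backward, one forward) by ONE forward pass keeping the last
-- real bid, the doubling state and a first-(player, strain)-index dict (objective: alternative).

-- ===== PORT A =====
-- a['bid'] / a['player']: first-match association lookup; Python raises KeyError when the key
-- is absent — Pre_ excludes that, so the "" default is never reached on admitted inputs.
def pvEntryGet (e : List (String × String)) (k : String) : String :=
  ((e.find? (fun p => p.1 == k)).map Prod.snd).getD ""

-- bid not in ['Pass', 'X', 'XX']  (both Pythons test exactly this)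
def pvIsReal (bid : String) : Bool :=
  !(bid == "Pass" || bid == "X" || bid == "XX")

-- strain = bid[-1] if 'NT' not in bid else 'NT'  (identical expression in both Pythons);
-- bid[-1] on "" raises IndexError — excluded by Pre_, the "" default is never reached there.
def pvStrainOf (bid : String) : String :=
  if PySem.Str.isIn "NT" bid then "NT"
  else match PySem.Str.pyGet? bid (-1) with
       | some c => String.ofList [c]
       | none => ""

-- A's first backward for-loop (range(len-1,-1,-1) = the reversed list): find the last real
-- bid, accumulating `doubled` over the tail of passes/doubles.
def aScanBack : List (List (String × String)) → String → Option String × String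
  | [], doubled => (none, doubled)
  | e :: rest, doubled =>
    let bid := pvEntryGet e "bid"
    if pvIsReal bid then (some bid, doubled)
    else if bid = "XX" then aScanBack rest "XX"
    else if bid = "X" ∧ doubled ≠ "XX" then aScanBack rest "X"
    else aScanBack rest doubled

-- A's second backward for-loop: the player of the last occurrence of last_real_bid.
def aFindWinner (lrb : String) : List (List (String × String)) → Option String
  | [] => none   -- Python would leave winning_player unbound; unreachable once lrb was found
  | e :: rest =>
    if pvEntryGet e "bid" = lrb then some (pvEntryGet e "player") else aFindWinner lrb rest

-- A's forward for-loop: first player of the winning side to have bid the strain.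
def aFindDeclarer (strain : String) (side : List String) :
    List (List (String × String)) → Option String
  | [] => none
  | e :: rest =>
    if pvEntryGet e "player" ∈ side then
      let bid := pvEntryGet e "bid"
      if pvIsReal bid ∧ pvStrainOf bid = strain then some (pvEntryGet e "player")
      else aFindDeclarer strain side rest
    else aFindDeclarer strain side rest

def determine_contract (auction : List (List (String × String))) :
    Option String × Option String × Option String :=
  -- bids_only = [a['bid'] for a in auction] is computed and never used in A; pure, omitted
  match aScanBack auction.reverse "" with
  | (none, _) => (none, none, none)
  | (some lrb, doubled) =>
    let strain := pvStrainOf lrb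
    let winning_player := (aFindWinner lrb auction.reverse).getD ""   -- getD unreachable
    let winning_side := if winning_player ∈ ["North", "South"]
                        then ["North", "South"] else ["East", "West"]
    (some (lrb ++ doubled), aFindDeclarer strain winning_side auction, some doubled)

-- ===== PORT B =====
-- the i1/i2-comparison tail of Source B
def bDeclarer (pair : String × String) (strain : String)
    (first : PySem.Dict (String × String) Int) : Option String :=
  match first.get? (pair.1, strain), first.get? (pair.2, strain) with
  | none, none => none
  | none, some _ => some pair.2
  | some _, none => some pair.1
  | some i1, some i2 => if i1 < i2 then some pair.1 else some pair.2

-- Source B's single forward loop; state (i, last, doubled, first)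
def bGo : List (List (String × String)) → Int → Option (String × String) → String →
    PySem.Dict (String × String) Int → Option String × Option String × Option String
  | [], _, last, doubled, first =>
    match last with
    | none => (none, none, none)
    | some (bid, player) =>
      let strain := pvStrainOf bid
      let pair := if player = "North" ∨ player = "South"
                  then ("North", "South") else ("East", "West")
      (some (bid ++ doubled), bDeclarer pair strain first, some doubled)
  | e :: rest, i, last, doubled, first =>
    let bid := pvEntryGet e "bid"
    let player := pvEntryGet e "player"
    if pvIsReal bid then
      bGo rest (i + 1) (some (bid, player)) "" (first.setdefault (player, pvStrainOf bid) i)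
    else if bid = "XX" then bGo rest (i + 1) last "XX" first
    else if bid = "X" ∧ doubled ≠ "XX" then bGo rest (i + 1) last "X" first
    else bGo rest (i + 1) last doubled first

def determine_contract_alt (auction : List (List (String × String))) :
    Option String × Option String × Option String :=
  bGo auction 0 none "" PySem.Dict.empty

-- ===== PRECONDITION & SPEC =====
-- Pre_ excludes entries without a "bid"/"player" key (Python KeyError) and empty bid strings
-- (IndexError on bid[-1]); A happens to return on some of those inputs when the bad entry is
-- never inspected by its scans, while B (which strains every real bid and reads every player)
-- raises there — see the cites.
def Pre_determine_contract (auction : List (List (String × String))) : Prop :=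
  ∀ e ∈ auction, ("bid" ∈ e.map Prod.fst) ∧ ("player" ∈ e.map Prod.fst) ∧
    ∀ p ∈ e, p.1 = "bid" → p.2 ≠ ""
instance (auction : List (List (String × String))) : Decidable (Pre_determine_contract auction) := by
  unfold Pre_determine_contract; infer_instance

def pvWitness_determine_contract : (List (List (String × String))) :=
  [[("bid", "1NT"), ("player", "North")], [("bid", "Pass"), ("player", "East")]]

def Spec_determine_contract (auction : List (List (String × String))) (out : Option String × Option String × Option String) : Prop := out = determine_contract_alt auction
instance (auction : List (List (String × String))) (out : Option String × Option String × Option String) : Decidable (Spec_determine_contract auction out) := by unfold Spec_determine_contract; infer_instance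

-- ===== CLAIM (what is proved, stated in full; the proofs are below) =====
def Claim_equal_determine_contract : Prop := ∀ (auction : List (List (String × String))), Dom_determine_contract auction → Pre_determine_contract auction → Spec_determine_contract auction (determine_contract auction)

-- ===== LEMMAS AND PROOFS =====

-- abbreviations for the proofs
def pvBid (e : List (String × String)) : String := pvEntryGet e "bid"
def pvP (e : List (String × String)) : Bool := pvIsReal (pvBid e)
-- doubled-update of one pass/double entry (both loops perform exactly this on non-real bids)
def pvDD (d : String) (e : List (String × String)) : String :=
  if pvBid e = "XX" then "XX" else if pvBid e = "X" ∧ d ≠ "XX" then "X" else d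
def pvHasXX (ys : List (List (String × String))) : Bool := ys.any (fun e => pvBid e == "XX")
def pvHasX (ys : List (List (String × String))) : Bool := ys.any (fun e => pvBid e == "X")

-- B's loop as a fold over an explicit state
def pvState : Type := Int × Option (String × String) × String × PySem.Dict (String × String) Int
def bStep (s : pvState) (e : List (String × String)) : pvState :=
  if pvP e then
    (s.1 + 1, some (pvBid e, pvEntryGet e "player"), "",
      s.2.2.2.setdefault (pvEntryGet e "player", pvStrainOf (pvBid e)) s.1)
  else if pvBid e = "XX" then (s.1 + 1, s.2.1, "XX", s.2.2.2)
  else if pvBid e = "X" ∧ s.2.2.1 ≠ "XX" then (s.1 + 1, s.2.1, "X", s.2.2.2)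
  else (s.1 + 1, s.2.1, s.2.2.1, s.2.2.2)
def bFinish (s : pvState) : Option String × Option String × Option String :=
  match s.2.1 with
  | none => (none, none, none)
  | some (bid, player) =>
    (some (bid ++ s.2.2.1),
     bDeclarer (if player = "North" ∨ player = "South"
                then ("North", "South") else ("East", "West")) (pvStrainOf bid) s.2.2.2,
     some s.2.2.1)

lemma bGo_cons (e : List (String × String)) (xs : List (List (String × String)))
    (i : Int) (l : Option (String × String)) (d : String)
    (f : PySem.Dict (String × String) Int) :
    bGo (e :: xs) i l d f =
      bGo xs (bStep (i, l, d, f) e).1 (bStep (i, l, d, f) e).2.1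
        (bStep (i, l, d, f) e).2.2.1 (bStep (i, l, d, f) e).2.2.2 := by
  simp only [bGo, bStep, pvP, pvBid]
  split_ifs <;> rfl

lemma bGo_eq_finish : ∀ (xs : List (List (String × String))) (s : pvState),
    bGo xs s.1 s.2.1 s.2.2.1 s.2.2.2 = bFinish (List.foldl bStep s xs) := by
  intro xs
  induction xs with
  | nil =>
    intro s
    obtain ⟨i, l, d, f⟩ := s
    cases l with
    | none => rfl
    | some p => rfl
  | cons e xs ih =>
    intro s
    obtain ⟨i, l, d, f⟩ := s
    rw [bGo_cons, List.foldl_cons]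
    exact ih (bStep (i, l, d, f) e)

lemma foldDD_XX : ∀ ys : List (List (String × String)), List.foldl pvDD "XX" ys = "XX" := by
  intro ys
  induction ys with
  | nil => rfl
  | cons e ys ih =>
    simp only [List.foldl_cons]
    have : pvDD "XX" e = "XX" := by
      unfold pvDD; split_ifs with h1 h2 <;> first | rfl | (exact absurd h2.2 (by simp))
    rw [this, ih]

lemma foldDD_X : ∀ ys : List (List (String × String)),
    List.foldl pvDD "X" ys = if pvHasXX ys then "XX" else "X" := by
  intro ys
  induction ys with
  | nil => rfl
  | cons e ys ih =>
    simp only [List.foldl_cons]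
    by_cases h1 : pvBid e = "XX"
    · rw [show pvDD "X" e = "XX" from by unfold pvDD; rw [if_pos h1]]
      rw [foldDD_XX]
      have hxx : pvHasXX (e :: ys) = true := by simp [pvHasXX, h1]
      rw [hxx]
      rfl
    · have hd : pvDD "X" e = "X" := by
        unfold pvDD; rw [if_neg h1]; split_ifs <;> rfl
      rw [hd, ih]
      have hxx : pvHasXX (e :: ys) = pvHasXX ys := by simp [pvHasXX, h1]
      rw [hxx]

lemma foldDD_nil : ∀ ys : List (List (String × String)),
    List.foldl pvDD "" ys = if pvHasXX ys then "XX" else if pvHasX ys then "X" else "" := by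
  intro ys
  induction ys with
  | nil => rfl
  | cons e ys ih =>
    simp only [List.foldl_cons]
    by_cases h1 : pvBid e = "XX"
    · rw [show pvDD "" e = "XX" from by unfold pvDD; rw [if_pos h1]]
      rw [foldDD_XX]
      have hxx : pvHasXX (e :: ys) = true := by simp [pvHasXX, h1]
      rw [hxx]
      rfl
    · by_cases h2 : pvBid e = "X"
      · rw [show pvDD "" e = "X" from by
          unfold pvDD; rw [if_neg h1, if_pos ⟨h2, by decide⟩]]
        rw [foldDD_X]
        have hxx : pvHasXX (e :: ys) = pvHasXX ys := by simp [pvHasXX, h1]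
        have hx : pvHasX (e :: ys) = true := by simp [pvHasX, h2]
        rw [hxx, hx]
        by_cases h3 : pvHasXX ys <;> simp [h3]
      · rw [show pvDD "" e = "" from by
          unfold pvDD; rw [if_neg h1, if_neg (fun hc => h2 hc.1)]]
        rw [ih]
        have hxx : pvHasXX (e :: ys) = pvHasXX ys := by simp [pvHasXX, h1]
        have hx : pvHasX (e :: ys) = pvHasX ys := by simp [pvHasX, h2]
        rw [hxx, hx]

lemma scanBack_nonreal : ∀ (ys zs : List (List (String × String))) (d : String),
    (∀ e ∈ ys, pvP e = false) →
    aScanBack (ys ++ zs) d = aScanBack zs (List.foldl pvDD d ys) := by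
  intro ys
  induction ys with
  | nil => intro zs d _; rfl
  | cons e ys ih =>
    intro zs d hall
    have he' : pvIsReal (pvEntryGet e "bid") = false := hall e (List.mem_cons_self ..)
    have hrest : ∀ x ∈ ys, pvP x = false := fun x hx => hall x (List.mem_cons_of_mem _ hx)
    simp only [List.cons_append, aScanBack, he', Bool.false_eq_true, if_false, List.foldl_cons]
    split_ifs with g1 g2
    · rw [show pvDD d e = "XX" by simp [pvDD, pvBid, g1]]
      exact ih zs "XX" hrest
    · rw [show pvDD d e = "X" by simp [pvDD, pvBid, g2.1, g2.2]]
      exact ih zs "X" hrest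
    · rw [show pvDD d e = d by simp only [pvDD, pvBid, g1, if_false]; exact if_neg g2]
      exact ih zs d hrest

lemma scanBack_real (r : List (String × String)) (l : List (List (String × String)))
    (d : String) (h : pvP r = true) : aScanBack (r :: l) d = (some (pvBid r), d) := by
  simp [aScanBack, pvBid, pvP] at *
  simp [h]

lemma findWinner_skip (lrb : String) : ∀ (ys zs : List (List (String × String))),
    (∀ e ∈ ys, pvBid e ≠ lrb) → aFindWinner lrb (ys ++ zs) = aFindWinner lrb zs := by
  intro ys
  induction ys with
  | nil => intro zs _; rfl
  | cons e ys ih =>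
    intro zs hall
    have : pvEntryGet e "bid" ≠ lrb := hall e (List.mem_cons_self ..)
    simp only [List.cons_append, aFindWinner, this, if_false]
    exact ih zs (fun x hx => hall x (List.mem_cons_of_mem _ hx))

lemma bStep_nonreal (s : pvState) (e : List (String × String)) (he : pvP e = false) :
    bStep s e = (s.1 + 1, s.2.1, pvDD s.2.2.1 e, s.2.2.2) := by
  unfold bStep pvDD
  rw [if_neg (by simp [he])]
  split_ifs <;> rfl

lemma foldStep_nonreal : ∀ (ys : List (List (String × String))) (s : pvState),
    (∀ e ∈ ys, pvP e = false) →
    List.foldl bStep s ys = (s.1 + ys.length, s.2.1, List.foldl pvDD s.2.2.1 ys, s.2.2.2) := by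
  intro ys
  induction ys with
  | nil =>
    intro s _
    obtain ⟨i, l, d, f⟩ := s
    simp
  | cons e ys ih =>
    intro s hall
    rw [List.foldl_cons, bStep_nonreal s e (hall e (List.mem_cons_self ..)),
      ih _ (fun x hx => hall x (List.mem_cons_of_mem _ hx))]
    refine Prod.ext ?_ rfl
    simp only [List.length_cons]
    push_cast
    ring

lemma get?_setdefault_keep (f : PySem.Dict (String × String) Int) (a k : String × String)
    (w v : Int) (h : f.get? k = some v) : (f.setdefault a w).get? k = some v := by
  by_cases hak : k = a
  · subst hak
    rw [PySem.Dict.setdefault_of_contains f w (by rw [PySem.Dict.contains_eq_isSome_get?, h]; rfl)]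
    exact h
  · rw [PySem.Dict.get?_setdefault_of_ne f w hak]
    exact h

-- the dict of B's fold never loses an entry
lemma dict_mono : ∀ (xs : List (List (String × String))) (s : pvState)
    (k : String × String) (v : Int), s.2.2.2.get? k = some v →
    ((List.foldl bStep s xs).2.2.2).get? k = some v := by
  intro xs
  induction xs with
  | nil => intro s k v h; exact h
  | cons e xs ih =>
    intro s k v h
    rw [List.foldl_cons]
    by_cases hp : pvP e
    · rw [show bStep s e = (s.1 + 1, some (pvBid e, pvEntryGet e "player"), "",
          s.2.2.2.setdefault (pvEntryGet e "player", pvStrainOf (pvBid e)) s.1) from by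
        unfold bStep; rw [if_pos hp]]
      refine ih _ k v ?_
      exact get?_setdefault_keep _ _ _ _ _ h
    · rw [bStep_nonreal s e (by simpa using hp)]
      exact ih _ k v h

-- a key absent from the dict is either still absent or got an index ≥ the current counter
lemma dict_fresh : ∀ (xs : List (List (String × String))) (s : pvState)
    (k : String × String), s.2.2.2.get? k = none →
    ((List.foldl bStep s xs).2.2.2).get? k = none ∨
      ∃ j, ((List.foldl bStep s xs).2.2.2).get? k = some j ∧ s.1 ≤ j := by
  intro xs
  induction xs with
  | nil => intro s k h; exact Or.inl h
  | cons e xs ih =>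
    intro s k h
    rw [List.foldl_cons]
    by_cases hp : pvP e
    · rw [show bStep s e = (s.1 + 1, some (pvBid e, pvEntryGet e "player"), "",
          s.2.2.2.setdefault (pvEntryGet e "player", pvStrainOf (pvBid e)) s.1) from by
        unfold bStep; rw [if_pos hp]]
      by_cases hak : k = (pvEntryGet e "player", pvStrainOf (pvBid e))
      · subst hak
        right
        refine ⟨s.1, ?_, le_refl _⟩
        refine dict_mono xs _ _ _ ?_
        show (PySem.Dict.setdefault _ _ s.1).get? _ = some s.1
        rw [PySem.Dict.setdefault_of_not_contains _ s.1
          (by rw [PySem.Dict.contains_eq_isSome_get?, h]; rfl)]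
        exact PySem.Dict.get?_insert_self _ _ _
      · have h' : ((s.2.2.2.setdefault (pvEntryGet e "player", pvStrainOf (pvBid e)) s.1)).get? k = none := by
          rw [PySem.Dict.get?_setdefault_of_ne _ s.1 hak]
          exact h
        rcases ih ((s.1 + 1, some (pvBid e, pvEntryGet e "player"), "",
            s.2.2.2.setdefault (pvEntryGet e "player", pvStrainOf (pvBid e)) s.1) : pvState) k h' with hn | ⟨j, hj, hle⟩
        · exact Or.inl hn
        · exact Or.inr ⟨j, hj, by omega⟩
    · rw [bStep_nonreal s e (by simpa using hp)]
      rcases ih ((s.1 + 1, s.2.1, pvDD s.2.2.1 e, s.2.2.2) : pvState) k h with hn | ⟨j, hj, hle⟩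
      · exact Or.inl hn
      · exact Or.inr ⟨j, hj, by omega⟩

-- crux: B's dict lookup computes A's declarer scan
lemma declarer_eq (p1 p2 st : String) (hne : p1 ≠ p2) :
    ∀ (xs : List (List (String × String))) (s : pvState),
    s.2.2.2.get? (p1, st) = none → s.2.2.2.get? (p2, st) = none →
    bDeclarer (p1, p2) st ((List.foldl bStep s xs).2.2.2) = aFindDeclarer st [p1, p2] xs := by
  intro xs
  induction xs with
  | nil =>
    intro s h1 h2
    simp only [List.foldl_nil, bDeclarer, h1, h2]
    rfl
  | cons e xs ih =>
    intro s h1 h2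
    rw [List.foldl_cons]
    by_cases hp : pvP e
    · have hb : pvIsReal (pvEntryGet e "bid") = true := by simpa [pvP, pvBid] using hp
      rw [show bStep s e = (s.1 + 1, some (pvBid e, pvEntryGet e "player"), "",
          s.2.2.2.setdefault (pvEntryGet e "player", pvStrainOf (pvBid e)) s.1) from by
        unfold bStep; rw [if_pos hp]]
      by_cases hst : pvStrainOf (pvBid e) = st
      · by_cases hp1 : pvEntryGet e "player" = p1
        · -- the first winning-side bid of this strain: both sides answer this player
          have hA : aFindDeclarer st [p1, p2] (e :: xs) = some (pvEntryGet e "player") := by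
            simp only [aFindDeclarer]
            rw [if_pos (by simp [hp1]), if_pos ⟨hb, by simpa [pvBid] using hst⟩]
          rw [hA]
          have hset : (s.2.2.2.setdefault (pvEntryGet e "player", pvStrainOf (pvBid e)) s.1).get?
              (p1, st) = some s.1 := by
            rw [hp1, hst, PySem.Dict.setdefault_of_not_contains _ s.1
              (by rw [PySem.Dict.contains_eq_isSome_get?, h1]; rfl)]
            exact PySem.Dict.get?_insert_self _ _ _
          have hg1 : ((List.foldl bStep (s.1 + 1, some (pvBid e, pvEntryGet e "player"), "",
              s.2.2.2.setdefault (pvEntryGet e "player", pvStrainOf (pvBid e)) s.1) xs).2.2.2).get?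
              (p1, st) = some s.1 := dict_mono xs _ _ _ hset
          have hset2 : (s.2.2.2.setdefault (pvEntryGet e "player", pvStrainOf (pvBid e)) s.1).get?
              (p2, st) = none := by
            rw [PySem.Dict.get?_setdefault_of_ne _ s.1 (by rw [hp1, hst]; simp [Ne.symm hne])]
            exact h2
          rcases dict_fresh xs (s.1 + 1, some (pvBid e, pvEntryGet e "player"), "",
              s.2.2.2.setdefault (pvEntryGet e "player", pvStrainOf (pvBid e)) s.1) (p2, st) hset2
            with hn | ⟨j, hj, hle⟩
          · simp only [bDeclarer, hg1, hn]
            rw [hp1]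
          · simp only [bDeclarer, hg1, hj]
            rw [if_pos (by omega), hp1]
        · by_cases hp2 : pvEntryGet e "player" = p2
          · have hA : aFindDeclarer st [p1, p2] (e :: xs) = some (pvEntryGet e "player") := by
              simp only [aFindDeclarer]
              rw [if_pos (by simp [hp2]), if_pos ⟨hb, by simpa [pvBid] using hst⟩]
            rw [hA]
            have hset : (s.2.2.2.setdefault (pvEntryGet e "player", pvStrainOf (pvBid e)) s.1).get?
                (p2, st) = some s.1 := by
              rw [hp2, hst, PySem.Dict.setdefault_of_not_contains _ s.1
                (by rw [PySem.Dict.contains_eq_isSome_get?, h2]; rfl)]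
              exact PySem.Dict.get?_insert_self _ _ _
            have hg2 : ((List.foldl bStep (s.1 + 1, some (pvBid e, pvEntryGet e "player"), "",
                s.2.2.2.setdefault (pvEntryGet e "player", pvStrainOf (pvBid e)) s.1) xs).2.2.2).get?
                (p2, st) = some s.1 := dict_mono xs _ _ _ hset
            have hset1 : (s.2.2.2.setdefault (pvEntryGet e "player", pvStrainOf (pvBid e)) s.1).get?
                (p1, st) = none := by
              rw [PySem.Dict.get?_setdefault_of_ne _ s.1 (by rw [hp2, hst]; simp [hne])]
              exact h1
            rcases dict_fresh xs (s.1 + 1, some (pvBid e, pvEntryGet e "player"), "",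
                s.2.2.2.setdefault (pvEntryGet e "player", pvStrainOf (pvBid e)) s.1) (p1, st) hset1
              with hn | ⟨j, hj, hle⟩
            · simp only [bDeclarer, hg2, hn]
              rw [hp2]
            · simp only [bDeclarer, hg2, hj]
              rw [if_neg (by omega), hp2]
          · -- a real bid of this strain by a player outside the winning side
            have hA : aFindDeclarer st [p1, p2] (e :: xs) = aFindDeclarer st [p1, p2] xs := by
              simp only [aFindDeclarer]
              rw [if_neg (by simp [hp1, hp2])]
            rw [hA]
            refine ih _ ?_ ?_ <;>
              rw [PySem.Dict.get?_setdefault_of_ne _ s.1 (by simp [Ne.symm hp1, Ne.symm hp2])] <;>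
              assumption
      · -- a real bid of another strain: the dict keys touched differ in the strain component
        have hA : aFindDeclarer st [p1, p2] (e :: xs) = aFindDeclarer st [p1, p2] xs := by
          simp only [aFindDeclarer]
          split_ifs with hmem hin
          · exact absurd (by simpa [pvBid] using hin.2) hst
          · rfl
          · rfl
        rw [hA]
        refine ih _ ?_ ?_ <;>
          rw [PySem.Dict.get?_setdefault_of_ne _ s.1 (by simp [Ne.symm hst])] <;>
          assumption
    · have hb : pvIsReal (pvEntryGet e "bid") = false := by simpa [pvP, pvBid] using hp
      rw [bStep_nonreal s e (by simpa using hp)]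
      have hA : aFindDeclarer st [p1, p2] (e :: xs) = aFindDeclarer st [p1, p2] xs := by
        simp only [aFindDeclarer, hb, Bool.false_eq_true, false_and, if_false, ite_self]
      rw [hA]
      exact ih _ h1 h2

lemma main_allpass (auction : List (List (String × String)))
    (hall : ∀ e ∈ auction, pvP e = false) :
    determine_contract auction = determine_contract_alt auction := by
  have halt : determine_contract_alt auction
      = bFinish (List.foldl bStep ((0 : Int), (none : Option (String × String)), "",
          (PySem.Dict.empty : PySem.Dict (String × String) Int)) auction) := by
    unfold determine_contract_alt
    exact bGo_eq_finish auction (0, none, "", PySem.Dict.empty)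
  have hallrev : ∀ e ∈ auction.reverse, pvP e = false :=
    fun e he => hall e (List.mem_reverse.mp he)
  have hA : determine_contract auction = (none, none, none) := by
    unfold determine_contract
    rw [show aScanBack auction.reverse "" = (none, List.foldl pvDD "" auction.reverse) from by
      conv_lhs => rw [← List.append_nil auction.reverse]
      rw [scanBack_nonreal _ _ _ hallrev]
      rfl]
  rw [hA, halt, foldStep_nonreal auction _ hall]
  rfl

lemma main_cons (auction : List (List (String × String)))
    (ts : List (List (String × String))) (r : List (String × String))
    (back : List (List (String × String)))
    (hrev : auction.reverse = ts ++ r :: back)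
    (hts : ∀ e ∈ ts, pvP e = false) (hPr : pvP r = true) :
    determine_contract auction = determine_contract_alt auction := by
  have halt : determine_contract_alt auction
      = bFinish (List.foldl bStep ((0 : Int), (none : Option (String × String)), "",
          (PySem.Dict.empty : PySem.Dict (String × String) Int)) auction) := by
    unfold determine_contract_alt
    exact bGo_eq_finish auction (0, none, "", PySem.Dict.empty)
  have hauction : auction = (back.reverse ++ [r]) ++ ts.reverse := by
    calc auction = auction.reverse.reverse := (List.reverse_reverse _).symm
      _ = (ts ++ r :: back).reverse := by rw [hrev]
      _ = _ := by simp
  have htsrev : ∀ e ∈ ts.reverse, pvP e = false :=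
    fun e he => hts e (List.mem_reverse.mp he)
  have hbidne : ∀ e ∈ ts, pvBid e ≠ pvBid r := by
    intro e he heq
    have : pvP e = pvP r := by unfold pvP; rw [heq]
    rw [hts e he, hPr] at this
    exact Bool.false_ne_true this
  have hscan : aScanBack auction.reverse "" = (some (pvBid r), List.foldl pvDD "" ts) := by
    rw [hrev, scanBack_nonreal _ _ _ hts, scanBack_real r back _ hPr]
  have hwin : aFindWinner (pvBid r) auction.reverse = some (pvEntryGet r "player") := by
    rw [hrev, findWinner_skip _ _ _ hbidne]
    simp [aFindWinner, pvBid]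
  have hA : determine_contract auction
      = (some (pvBid r ++ List.foldl pvDD "" ts),
         aFindDeclarer (pvStrainOf (pvBid r))
           (if pvEntryGet r "player" ∈ ["North", "South"]
            then ["North", "South"] else ["East", "West"]) auction,
         some (List.foldl pvDD "" ts)) := by
    unfold determine_contract
    rw [hscan]
    simp only [hwin, Option.getD_some]
  have hF : List.foldl bStep ((0 : Int), (none : Option (String × String)), "",
        (PySem.Dict.empty : PySem.Dict (String × String) Int)) auction
      = ((List.foldl bStep ((0 : Int), (none : Option (String × String)), "",
            (PySem.Dict.empty : PySem.Dict (String × String) Int)) back.reverse).1 + 1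
            + (ts.reverse.length : Int),
         some (pvBid r, pvEntryGet r "player"),
         List.foldl pvDD "" ts.reverse,
         (List.foldl bStep ((0 : Int), (none : Option (String × String)), "",
            (PySem.Dict.empty : PySem.Dict (String × String) Int)) back.reverse).2.2.2.setdefault
           (pvEntryGet r "player", pvStrainOf (pvBid r))
           (List.foldl bStep ((0 : Int), (none : Option (String × String)), "",
            (PySem.Dict.empty : PySem.Dict (String × String) Int)) back.reverse).1) := by
    conv_lhs => rw [hauction]
    rw [List.foldl_append, List.foldl_append]
    rw [show List.foldl bStep (List.foldl bStep ((0 : Int), (none : Option (String × String)), "",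
          (PySem.Dict.empty : PySem.Dict (String × String) Int)) back.reverse) [r]
        = ((List.foldl bStep ((0 : Int), (none : Option (String × String)), "",
              (PySem.Dict.empty : PySem.Dict (String × String) Int)) back.reverse).1 + 1,
           some (pvBid r, pvEntryGet r "player"), "",
           (List.foldl bStep ((0 : Int), (none : Option (String × String)), "",
              (PySem.Dict.empty : PySem.Dict (String × String) Int)) back.reverse).2.2.2.setdefault
             (pvEntryGet r "player", pvStrainOf (pvBid r))
             (List.foldl bStep ((0 : Int), (none : Option (String × String)), "",
              (PySem.Dict.empty : PySem.Dict (String × String) Int)) back.reverse).1) from by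
      simp only [List.foldl_cons, List.foldl_nil]
      unfold bStep
      rw [if_pos hPr]]
    rw [foldStep_nonreal _ _ htsrev]
  have hD : List.foldl pvDD "" ts.reverse = List.foldl pvDD "" ts := by
    rw [foldDD_nil, foldDD_nil]
    simp [pvHasXX, pvHasX]
  have hdecl : bDeclarer
      (if pvEntryGet r "player" = "North" ∨ pvEntryGet r "player" = "South"
       then ("North", "South") else ("East", "West")) (pvStrainOf (pvBid r))
      ((List.foldl bStep ((0 : Int), (none : Option (String × String)), "",
        (PySem.Dict.empty : PySem.Dict (String × String) Int)) auction).2.2.2)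
      = aFindDeclarer (pvStrainOf (pvBid r))
          (if pvEntryGet r "player" ∈ ["North", "South"]
           then ["North", "South"] else ["East", "West"]) auction := by
    by_cases hNS : pvEntryGet r "player" = "North" ∨ pvEntryGet r "player" = "South"
    · rw [if_pos hNS, if_pos (by simpa using hNS)]
      exact declarer_eq "North" "South" (pvStrainOf (pvBid r)) (by decide) auction _
        (PySem.Dict.get?_empty _) (PySem.Dict.get?_empty _)
    · rw [if_neg hNS, if_neg (by simpa using hNS)]
      exact declarer_eq "East" "West" (pvStrainOf (pvBid r)) (by decide) auction _
        (PySem.Dict.get?_empty _) (PySem.Dict.get?_empty _)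
  rw [hA, halt, ← hdecl, hF]
  simp only [bFinish, hD]

lemma main_eq (auction : List (List (String × String))) :
    determine_contract auction = determine_contract_alt auction := by
  have hsplit : auction.reverse.takeWhile (fun e => !pvP e)
      ++ auction.reverse.dropWhile (fun e => !pvP e) = auction.reverse :=
    List.takeWhile_append_dropWhile
  have hts : ∀ e ∈ auction.reverse.takeWhile (fun e => !pvP e), pvP e = false := by
    intro e he
    simpa using List.mem_takeWhile_imp he
  cases hds : auction.reverse.dropWhile (fun e => !pvP e) with
  | nil =>
    refine main_allpass auction (fun e he => ?_)
    have hrev : auction.reverse = auction.reverse.takeWhile (fun e => !pvP e) := by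
      conv_lhs => rw [← hsplit, hds, List.append_nil]
    exact hts e (by rw [← hrev]; exact List.mem_reverse.mpr he)
  | cons r back =>
    have hPr : pvP r = true := by
      have hhd : (auction.reverse.dropWhile (fun e => !pvP e)).head (by simp [hds]) = r := by
        simp [hds]
      have := List.head_dropWhile_not (fun e => !pvP e)
        (l := auction.reverse) (by simp [hds])
      rw [hhd] at this
      simpa using this
    exact main_cons auction _ r back (by conv_lhs => rw [← hsplit, hds]) hts hPr

-- ===== VERDICT (by name: the statement is the Claim_ definition above) =====
theorem determine_contract_spec : Claim_equal_determine_contract := by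
  intro auction _ _
  unfold Spec_determine_contract
  exact main_eq auction
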